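-- pv_equiv track=rewrite | github.com/rjssantos13/KJMedia | src/kjmedia/ui/screens/edit_filename_screen.py | _validate_title_format
-- ===== SOURCE A (Python) =====
-- def _validate_title_format(title):
--     # Must contain exactly one dash, with non-empty sides
--     if title.count("-") != 1:
--         return False, "Title must be in format: Artist Name - Title"
--     left, right = [part.strip() for part in title.split("-", 1)]
--     if not left or not right:
--         return False, "Both artist and title must be non-empty"
--     if "-" in left or "-" in right:
--         return False, "Only a single dash is allowed"
--     return True, f"{left} - {right}"
-- ===== SOURCE B (Python) =====
-- def _validate_title_format(title):
--     # Single pass over the characters: accumulate artist and title around the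
--     # unique dash, rejecting a second dash or a missing dash on the fly.
--     left_chars, right_chars = [], []
--     dash_seen = False
--     for ch in title:
--         if ch == "-":
--             if dash_seen:
--                 return False, "Title must be in format: Artist Name - Title"
--             dash_seen = True
--         elif dash_seen:
--             right_chars.append(ch)
--         else:
--             left_chars.append(ch)
--     if not dash_seen:
--         return False, "Title must be in format: Artist Name - Title"
--     left = "".join(left_chars).strip()
--     right = "".join(right_chars).strip()
--     if not left or not right:
--         return False, "Both artist and title must be non-empty"
--     return True, f"{left} - {right}"
-- ===== Notes on version B (the rewrite author's own statement) =====
-- stated objective: alternative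
-- what changed: B replaces A's staged library passes (count, then split with maxsplit, then per-part strip/dash checks) with one explicit character loop that accumulates the artist and title around the unique dash and rejects a second or missing dash on the fly; A's unreachable third error branch disappears.
import Mathlib
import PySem

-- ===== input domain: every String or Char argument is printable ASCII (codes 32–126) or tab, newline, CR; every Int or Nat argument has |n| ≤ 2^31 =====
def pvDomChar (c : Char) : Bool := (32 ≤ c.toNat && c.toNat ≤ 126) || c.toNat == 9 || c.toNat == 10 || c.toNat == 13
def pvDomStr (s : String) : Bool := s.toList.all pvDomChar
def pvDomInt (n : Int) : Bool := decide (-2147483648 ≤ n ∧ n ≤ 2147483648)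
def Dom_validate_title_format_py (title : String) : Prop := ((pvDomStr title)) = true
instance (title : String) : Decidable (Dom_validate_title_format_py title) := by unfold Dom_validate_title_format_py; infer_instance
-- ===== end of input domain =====

-- B replaces A's staged library passes (count, split with maxsplit, per-part strip/dash
-- checks) with one explicit character loop accumulating the two sides around the unique
-- dash, rejecting a second or missing dash on the fly (alternative decomposition).

-- ===== PORT A =====
def validate_title_format_py (title : String) : Bool × String :=
  if PySem.Str.count title "-" ≠ 1 then
    (false, "Title must be in format: Artist Name - Title")
  else
    match ((PySem.Str.splitMax? title "-" 1).getD []).map PySem.Str.strip with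
    | [left, right] =>
      if left = "" ∨ right = "" then (false, "Both artist and title must be non-empty")
      else if PySem.Str.isIn "-" left || PySem.Str.isIn "-" right then
        (false, "Only a single dash is allowed")
      else (true, left ++ " - " ++ right)
    | _ => (false, "")  -- unreachable: with exactly one dash the split has exactly two parts

-- ===== PORT B =====
-- The for-loop of Source B: state = (dash_seen, left_chars, right_chars) with reversed accumulators;
-- 'none' is Source B's early return / missing-dash return (both carry the same message).
def pvAltLoop : List Char → Bool → List Char → List Char → Option (List Char × List Char)
  | [], ds, l, r => if ds then some (l.reverse, r.reverse) else none
  | c :: t, ds, l, r =>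
    if c = '-' then (if ds then none else pvAltLoop t true l r)
    else if ds then pvAltLoop t ds l (c :: r)
    else pvAltLoop t ds (c :: l) r

def validate_title_format_py_alt (title : String) : Bool × String :=
  match pvAltLoop title.toList false [] [] with
  | none => (false, "Title must be in format: Artist Name - Title")
  | some (lc, rc) =>
    let left := PySem.Str.strip (String.ofList lc)
    let right := PySem.Str.strip (String.ofList rc)
    if left = "" ∨ right = "" then (false, "Both artist and title must be non-empty")
    else (true, left ++ " - " ++ right)

-- ===== PRECONDITION & SPEC =====
def Spec_validate_title_format_py (title : String) (out : Bool × String) : Prop := out = validate_title_format_py_alt title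
instance (title : String) (out : Bool × String) : Decidable (Spec_validate_title_format_py title out) := by unfold Spec_validate_title_format_py; infer_instance

-- ===== CLAIM (what is proved, stated in full; the proofs are below) =====
def Claim_equal_validate_title_format_py : Prop := ∀ (title : String), Dom_validate_title_format_py title → Spec_validate_title_format_py title (validate_title_format_py title)

-- ===== LEMMAS AND PROOFS =====

-- Specification split on '-' (no max), built front-to-back.
def pvSp : List Char → List (List Char)
  | [] => [[]]
  | c :: t => if c = '-' then [] :: pvSp t else (pvSp t).modifyHead (c :: ·)

-- Specification split on '-' with maxsplit = 1.
def pvSp1 : List Char → List (List Char)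
  | [] => [[]]
  | c :: t => if c = '-' then [[], t] else (pvSp1 t).modifyHead (c :: ·)

theorem pvSp_ne_nil (l : List Char) : pvSp l ≠ [] := by
  cases l with
  | nil => simp [pvSp]
  | cons c t =>
    simp only [pvSp]
    split
    · simp
    · intro h; exact pvSp_ne_nil t (by simpa using List.modifyHead_eq_nil_iff.mp h)

theorem pvSp1_ne_nil (l : List Char) : pvSp1 l ≠ [] := by
  cases l with
  | nil => simp [pvSp1]
  | cons c t =>
    simp only [pvSp1]
    split
    · simp
    · intro h; exact pvSp1_ne_nil t (by simpa using List.modifyHead_eq_nil_iff.mp h)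

theorem pv_count_go (fuel : Nat) : ∀ (l : List Char) (acc : Nat), l.length ≤ fuel →
    PySem.Chars.count.go ['-'] fuel l acc = acc + l.count '-' := by
  induction fuel with
  | zero =>
    intro l acc h
    have hl : l = [] := List.eq_nil_of_length_eq_zero (Nat.le_zero.mp h)
    subst hl; simp [PySem.Chars.count.go]
  | succ n ih =>
    intro l acc h
    cases l with
    | nil => simp [PySem.Chars.count.go]
    | cons c t =>
      have ht : t.length ≤ n := by simpa using h
      by_cases hc : c = '-'
      · subst hc
        simp [PySem.Chars.count.go, List.isPrefixOf, ih t (acc + 1) ht]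
        omega
      · simp [PySem.Chars.count.go, List.isPrefixOf, Ne.symm hc, ih t acc ht, hc]

theorem pv_count_eq (l : List Char) : PySem.Chars.count l ['-'] = l.count '-' := by
  simp [PySem.Chars.count, pv_count_go l.length l 0 le_rfl]

theorem pv_splitOnMax_go_zero (fuel : Nat) (l cur : List Char) (acc : List (List Char)) :
    PySem.Chars.splitOnMax.go ['-'] fuel 0 l cur acc = acc.reverse ++ [cur.reverse ++ l] := by
  cases fuel with
  | zero => simp [PySem.Chars.splitOnMax.go]
  | succ n =>
    cases l with
    | nil => simp [PySem.Chars.splitOnMax.go]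
    | cons c t => simp [PySem.Chars.splitOnMax.go]

theorem pv_splitOnMax_go_one (fuel : Nat) : ∀ (l cur : List Char) (acc : List (List Char)), l.length ≤ fuel →
    PySem.Chars.splitOnMax.go ['-'] fuel 1 l cur acc =
      acc.reverse ++ (pvSp1 l).modifyHead (cur.reverse ++ ·) := by
  induction fuel with
  | zero =>
    intro l cur acc h
    have hl : l = [] := List.eq_nil_of_length_eq_zero (Nat.le_zero.mp h)
    subst hl; simp [PySem.Chars.splitOnMax.go, pvSp1]
  | succ n ih =>
    intro l cur acc h
    cases l with
    | nil => simp [PySem.Chars.splitOnMax.go, pvSp1]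
    | cons c t =>
      have ht : t.length ≤ n := by simpa using h
      obtain ⟨hd, tl, hst⟩ : ∃ hd tl, pvSp1 t = hd :: tl := by
        cases hsp : pvSp1 t with
        | nil => exact absurd hsp (pvSp1_ne_nil t)
        | cons a b => exact ⟨a, b, rfl⟩
      by_cases hc : c = '-'
      · subst hc
        simp [PySem.Chars.splitOnMax.go, List.isPrefixOf, pv_splitOnMax_go_zero n t []
              (cur.reverse :: acc), pvSp1]
      · simp [PySem.Chars.splitOnMax.go, List.isPrefixOf, Ne.symm hc, ih t (c :: cur) acc ht,
             pvSp1, hc, hst]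

theorem pv_splitOnMax_eq (l : List Char) : PySem.Chars.splitOnMax l ['-'] 1 = pvSp1 l := by
  obtain ⟨hd, tl, hst⟩ : ∃ hd tl, pvSp1 l = hd :: tl := by
    cases hsp : pvSp1 l with
    | nil => exact absurd hsp (pvSp1_ne_nil l)
    | cons a b => exact ⟨a, b, rfl⟩
  simp [PySem.Chars.splitOnMax, pv_splitOnMax_go_one (l.length + 1) l [] [] (by omega), hst]

theorem pv_length_sp (l : List Char) : (pvSp l).length = l.count '-' + 1 := by
  induction l with
  | nil => simp [pvSp]
  | cons c t ih =>
    simp only [pvSp]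
    by_cases hc : c = '-'
    · simp [hc, ih]
    · simp [hc, ih]

theorem pv_sp_no_dash (l : List Char) : ∀ p ∈ pvSp l, '-' ∉ p := by
  induction l with
  | nil => simp [pvSp]
  | cons c t ih =>
    intro p hp
    simp only [pvSp] at hp
    by_cases hc : c = '-'
    · simp [hc] at hp
      rcases hp with h | h
      · simp [h]
      · exact ih p h
    · rw [if_neg hc] at hp
      obtain ⟨h, ts, hst⟩ : ∃ h ts, pvSp t = h :: ts := by
        cases hsp : pvSp t with
        | nil => exact absurd hsp (pvSp_ne_nil t)
        | cons a b => exact ⟨a, b, rfl⟩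
      rw [hst] at hp
      simp only [List.modifyHead, List.mem_cons] at hp
      rcases hp with h' | h'
      · subst h'
        intro hm
        rcases List.mem_cons.mp hm with h'' | h''
        · exact hc h''.symm
        · exact ih h (by rw [hst]; exact List.mem_cons_self) h''
      · exact ih p (by rw [hst]; exact List.mem_cons_of_mem _ h')

theorem pv_sp_of_no_dash (l : List Char) (h : '-' ∉ l) : pvSp l = [l] := by
  induction l with
  | nil => simp [pvSp]
  | cons c t ih =>
    have hc : c ≠ '-' := fun hc => h (by simp [hc])
    simp only [pvSp, if_neg hc, ih (fun hm => h (List.mem_cons_of_mem _ hm))]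
    simp [List.modifyHead]

theorem pv_sp1_eq_sp (l : List Char) (h : l.count '-' ≤ 1) : pvSp1 l = pvSp l := by
  induction l with
  | nil => rfl
  | cons c t ih =>
    simp only [pvSp, pvSp1]
    by_cases hc : c = '-'
    · subst hc
      have ht : '-' ∉ t := by
        intro hm
        have h1 := List.count_pos_iff.mpr hm
        simp at h
        omega
      rw [pv_sp_of_no_dash t ht]
      simp
    · rw [if_neg hc, if_neg hc, ih (by simpa [List.count_cons, hc] using h)]

theorem pv_strip_no_dash (l : List Char) (h : '-' ∉ l) :
    PySem.Chars.isIn ['-'] (PySem.Chars.strip l) = false := by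
  rw [PySem.Chars.isIn_eq_false_iff]
  intro hinf
  have hmem : '-' ∈ PySem.Chars.strip l := hinf.subset (by simp)
  apply h
  have h2 : '-' ∈ PySem.Chars.lstrip l := by
    have := hmem
    simp only [PySem.Chars.strip, PySem.Chars.rstrip, List.mem_reverse] at this
    exact List.mem_reverse.mp ((List.dropWhile_sublist _).mem this)
  exact (List.dropWhile_sublist _).mem h2

-- pvSp's two-piece view: the value Source B's loop computes.
def pvTwo (l : List Char) : Option (List Char × List Char) :=
  match pvSp l with
  | [a, b] => some (a, b)
  | _ => none

theorem pv_altLoop_true (t : List Char) : ∀ (l r : List Char),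
    pvAltLoop t true l r = if '-' ∈ t then none else some (l.reverse, r.reverse ++ t) := by
  induction t with
  | nil => intro l r; simp [pvAltLoop]
  | cons c t ih =>
    intro l r
    by_cases hc : c = '-'
    · simp [pvAltLoop, hc]
    · simp [pvAltLoop, hc, ih l (c :: r), Ne.symm hc]

theorem pv_altLoop_false (t : List Char) : ∀ (l : List Char),
    pvAltLoop t false l [] = (pvTwo t).map (fun p => (l.reverse ++ p.1, p.2)) := by
  induction t with
  | nil => intro l; simp [pvAltLoop, pvTwo, pvSp]
  | cons c t ih =>
    intro l
    by_cases hc : c = '-'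
    · subst hc
      rw [show pvAltLoop ('-' :: t) false l [] = pvAltLoop t true l [] from by simp [pvAltLoop],
          pv_altLoop_true t l []]
      by_cases hm : '-' ∈ t
      · have hlen : 2 ≤ (pvSp t).length := by
          have := List.count_pos_iff.mpr hm
          rw [pv_length_sp]; omega
        rw [if_pos hm]
        match hsp : pvSp t with
        | [] => exact absurd hsp (pvSp_ne_nil t)
        | [a] => rw [hsp] at hlen; simp at hlen
        | a :: b :: ts => simp [pvTwo, pvSp, hsp]
      · rw [if_neg hm, pvTwo]
        simp [pvSp, pv_sp_of_no_dash t hm]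
    · simp only [pvAltLoop, if_neg hc, ih (c :: l)]
      match hsp : pvSp t with
      | [] => exact absurd hsp (pvSp_ne_nil t)
      | [a] => simp [pvTwo, pvSp, hc, hsp]
      | [a, b] => simp [pvTwo, pvSp, hc, hsp]
      | a :: b :: x :: ts => simp [pvTwo, pvSp, hc, hsp]

-- ===== VERDICT (by name: the statement is the Claim_ definition above) =====
theorem validate_title_format_py_spec : Claim_equal_validate_title_format_py := by
  intro title _
  unfold Spec_validate_title_format_py validate_title_format_py validate_title_format_py_alt
  rw [PySem.Str.count_eq]
  have hdash : ("-" : String).toList = ['-'] := rfl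
  rw [hdash, pv_count_eq, pv_altLoop_false title.toList []]
  by_cases hn : title.toList.count '-' = 1
  · rw [if_neg (by simpa using hn)]
    have hmax : ((PySem.Str.splitMax? title "-" 1).getD []) = (pvSp1 title.toList).map String.ofList := by
      simp [PySem.Str.splitMax?, PySem.Chars.splitMax?, hdash, pv_splitOnMax_eq]
    rw [hmax, pv_sp1_eq_sp _ (le_of_eq hn)]
    obtain ⟨a, b, hsp⟩ : ∃ a b, pvSp title.toList = [a, b] := by
      have hlen := pv_length_sp title.toList
      rw [hn] at hlen
      match hsp : pvSp title.toList with
      | [a, b] => exact ⟨a, b, rfl⟩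
      | [] => exact absurd hsp (pvSp_ne_nil _)
      | [a] => rw [hsp] at hlen; simp at hlen
      | a :: b :: c :: t => rw [hsp] at hlen; simp at hlen
    rw [hsp]
    have ha : '-' ∉ a := pv_sp_no_dash title.toList a (by rw [hsp]; simp)
    have hb : '-' ∉ b := pv_sp_no_dash title.toList b (by rw [hsp]; simp)
    simp [pvTwo, hsp, pv_strip_no_dash a ha, pv_strip_no_dash b hb]
  · rw [if_pos (by simpa using hn)]
    have hlen := pv_length_sp title.toList
    match hsp : pvSp title.toList with
    | [a, b] => rw [hsp] at hlen; simp at hlen; omega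
    | [] => exact absurd hsp (pvSp_ne_nil _)
    | [a] => simp [pvTwo, hsp]
    | a :: b :: c :: t => simp [pvTwo, hsp]
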